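-- pv_equiv track=rewrite | github.com/msrosenberg/ImpactFactor | Impact_Funcs.py | calculate_stratified_h
-- ===== SOURCE A (Python) =====
-- from typing import Tuple, Union, Optional
--
-- def rank(n: int, indx: list) -> list:
--     irank = [0 for _ in range(n)]
--     for j in range(n):
--         irank[indx[j]] = j
--     return irank
--
-- def sort_and_rank(sort_list: list, n: int) -> Tuple[list, list]:
--     tmpindex = sorted(range(n), key=lambda k: sort_list[k])
--     tmprank = rank(n, tmpindex)
--     # reverse so #1 is largest
--     # NOTE: the ranks in rank_order go from 1 to n, rather than 0 to n-1
--     rank_order = []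
--     for i in range(n):
--         rank_order.append(n - tmprank[i])
--     return tmpindex, rank_order
--
-- def calculate_stratified_h(h: int, author_pos: list, author_cnts: list, citations: list) -> list:
--     def calc_h(cites: list) -> int:
--         hn = 0
--         n = len(cites)
--         _, tmporder = sort_and_rank(cites, n)
--         for j in range(n):
--             if tmporder[j] <= cites[j]:
--                 hn += 1
--         return hn
--
--     # sort citations of publications into lists based on author position
--     pub1, pub2, pub3, publast = [], [], [], []
--     for i, p in enumerate(author_pos):
--         if p == 1:
--             pub1.append(citations[i])
--         elif p == 2:
--             pub2.append(citations[i])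
--         elif p == 3:
--             pub3.append(citations[i])
--         # elif p == author_cnts[i]:
--         if p == author_cnts[i]:  # do this separately, because for solo-authored papers, one is both 1st and last author
--             publast.append(citations[i])
--
--     h1 = calc_h(pub1)
--     h2 = calc_h(pub2)
--     h3 = calc_h(pub3)
--     hlast = calc_h(publast)
--
--     return [h, h1, h2, h3, hlast]
-- ===== SOURCE B (Python) =====
-- def calculate_stratified_h(h, author_pos, author_cnts, citations):
--     # h-index by descending sort + 1-based count; no rank/inverse-permutation tables
--     def calc_h(cites):
--         s = sorted(cites, reverse=True)
--         hn = 0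
--         for i in range(len(s)):
--             if s[i] >= i + 1:
--                 hn += 1
--         return hn
--
--     pub1 = [citations[i] for i, p in enumerate(author_pos) if p == 1]
--     pub2 = [citations[i] for i, p in enumerate(author_pos) if p == 2]
--     pub3 = [citations[i] for i, p in enumerate(author_pos) if p == 3]
--     publast = [citations[i] for i, p in enumerate(author_pos) if p == author_cnts[i]]
--     return [h, calc_h(pub1), calc_h(pub2), calc_h(pub3), calc_h(publast)]
-- ===== Notes on version B (the rewrite author's own statement) =====
-- stated objective: simpler
-- what changed: The h-index helper drops the sort_and_rank/inverse-rank-table machinery (index sort, rank array written by position, rank_order scan in original order) and instead sorts the citation values descending and counts 1-based positions i with s[i-1] >= i; the partition step becomes four comprehensions instead of one accumulator loop.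
import Mathlib
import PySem

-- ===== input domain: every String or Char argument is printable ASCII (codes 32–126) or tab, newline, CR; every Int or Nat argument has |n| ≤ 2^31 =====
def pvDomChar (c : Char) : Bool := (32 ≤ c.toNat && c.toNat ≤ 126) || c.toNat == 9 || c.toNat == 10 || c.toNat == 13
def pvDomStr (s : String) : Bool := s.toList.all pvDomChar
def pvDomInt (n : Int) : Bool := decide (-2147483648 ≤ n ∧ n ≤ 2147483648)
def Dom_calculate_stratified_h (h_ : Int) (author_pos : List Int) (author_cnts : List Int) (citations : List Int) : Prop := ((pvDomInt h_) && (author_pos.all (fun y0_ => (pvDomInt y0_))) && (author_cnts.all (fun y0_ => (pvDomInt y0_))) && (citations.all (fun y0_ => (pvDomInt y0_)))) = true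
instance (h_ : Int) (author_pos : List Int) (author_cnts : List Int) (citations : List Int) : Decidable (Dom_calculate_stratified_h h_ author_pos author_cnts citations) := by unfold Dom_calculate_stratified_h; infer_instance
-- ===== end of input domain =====

-- B replaces the sort_and_rank/inverse-rank-table h-index helper by a descending sort with a
-- 1-based positional count, and the accumulator partition loop by comprehensions (simpler; same result).

-- ===== PORT A =====

-- rank(n, indx): irank = [0]*n; irank[indx[j]] = j.  Every call site has 0 ≤ indx[j] < n,
-- where `.set (…).toNat` is exactly Python's list assignment.
def pvRank (n : Int) (indx : List Int) : List Int :=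
  (PySem.List.pyRange 0 n).foldl
    (fun irank j => irank.set (PySem.List.pyGetD indx j 0).toNat j)
    (List.replicate n.toNat 0)

-- sort_and_rank(sort_list, n); every call has n = len(sort_list), so sort_list[k] is in range
def pvSortAndRank (sortList : List Int) (n : Int) : List Int × List Int :=
  let tmpindex := PySem.List.sorted (PySem.List.pyRange 0 n) (fun k => PySem.List.pyGetD sortList k 0)
  let tmprank := pvRank n tmpindex
  let rankOrder := (PySem.List.pyRange 0 n).foldl
    (fun acc i => acc ++ [n - PySem.List.pyGetD tmprank i 0]) []
  (tmpindex, rankOrder)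

-- calc_h(cites)
def pvCalcH (cites : List Int) : Int :=
  let n := PySem.List.len cites
  let tmporder := (pvSortAndRank cites n).2
  (PySem.List.pyRange 0 n).foldl
    (fun hn j => if PySem.List.pyGetD tmporder j 0 ≤ PySem.List.pyGetD cites j 0 then hn + 1 else hn) 0

def calculate_stratified_h (h_ : Int) (author_pos : List Int) (author_cnts : List Int) (citations : List Int) : List Int :=
  let pubs := (PySem.List.pyRange 0 (PySem.List.len author_pos)).foldl
    (fun (s : List Int × List Int × List Int × List Int) i =>
      let p := PySem.List.pyGetD author_pos i 0
      let t : List Int × List Int × List Int :=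
        if p = 1 then (s.1 ++ [PySem.List.pyGetD citations i 0], s.2.1, s.2.2.1)
        else if p = 2 then (s.1, s.2.1 ++ [PySem.List.pyGetD citations i 0], s.2.2.1)
        else if p = 3 then (s.1, s.2.1, s.2.2.1 ++ [PySem.List.pyGetD citations i 0])
        else (s.1, s.2.1, s.2.2.1)
      let publast := if p = PySem.List.pyGetD author_cnts i 0
        then s.2.2.2 ++ [PySem.List.pyGetD citations i 0] else s.2.2.2
      (t.1, t.2.1, t.2.2, publast))
    ([], [], [], [])
  [h_, pvCalcH pubs.1, pvCalcH pubs.2.1, pvCalcH pubs.2.2.1, pvCalcH pubs.2.2.2]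

-- ===== PORT B =====

-- calc_h(cites): descending sort, count 0-based positions i with s[i] >= i+1
def pvCalcHAlt (cites : List Int) : Int :=
  let s := PySem.List.sorted cites (fun x => x) true
  (PySem.List.pyRange 0 (PySem.List.len s)).foldl
    (fun hn i => if PySem.List.pyGetD s i 0 ≥ i + 1 then hn + 1 else hn) 0

def calculate_stratified_h_alt (h_ : Int) (author_pos : List Int) (author_cnts : List Int) (citations : List Int) : List Int :=
  let pub1 := (author_pos.zipIdx.filter (fun q => q.1 == 1)).map
    (fun q => PySem.List.pyGetD citations (q.2 : Int) 0)
  let pub2 := (author_pos.zipIdx.filter (fun q => q.1 == 2)).map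
    (fun q => PySem.List.pyGetD citations (q.2 : Int) 0)
  let pub3 := (author_pos.zipIdx.filter (fun q => q.1 == 3)).map
    (fun q => PySem.List.pyGetD citations (q.2 : Int) 0)
  let publast := (author_pos.zipIdx.filter (fun q => q.1 == PySem.List.pyGetD author_cnts (q.2 : Int) 0)).map
    (fun q => PySem.List.pyGetD citations (q.2 : Int) 0)
  [h_, pvCalcHAlt pub1, pvCalcHAlt pub2, pvCalcHAlt pub3, pvCalcHAlt publast]

-- ===== PRECONDITION & SPEC =====
-- Pre_ is exactly where Python A returns: author_cnts[i] is read for every i, and citations[i]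
-- only for the i whose position is 1, 2, 3 or equal to author_cnts[i] (IndexError otherwise).
def Pre_calculate_stratified_h (h_ : Int) (author_pos : List Int) (author_cnts : List Int) (citations : List Int) : Prop :=
  author_pos.length ≤ author_cnts.length ∧
  ∀ i < author_pos.length,
    (author_pos.getD i 0 = 1 ∨ author_pos.getD i 0 = 2 ∨ author_pos.getD i 0 = 3 ∨
      author_pos.getD i 0 = author_cnts.getD i 0) → i < citations.length
instance (h_ : Int) (author_pos : List Int) (author_cnts : List Int) (citations : List Int) : Decidable (Pre_calculate_stratified_h h_ author_pos author_cnts citations) := by unfold Pre_calculate_stratified_h; infer_instance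

def pvWitness_calculate_stratified_h : Int × List Int × List Int × List Int := (7, [1, 2, 2], [2, 2, 3], [5, 0, 3])

def Spec_calculate_stratified_h (h_ : Int) (author_pos : List Int) (author_cnts : List Int) (citations : List Int) (out : List Int) : Prop := out = calculate_stratified_h_alt h_ author_pos author_cnts citations
instance (h_ : Int) (author_pos : List Int) (author_cnts : List Int) (citations : List Int) (out : List Int) : Decidable (Spec_calculate_stratified_h h_ author_pos author_cnts citations out) := by unfold Spec_calculate_stratified_h; infer_instance

-- ===== CLAIM (what is proved, stated in full; the proofs are below) =====
def Claim_equal_calculate_stratified_h : Prop := ∀ (h_ : Int) (author_pos : List Int) (author_cnts : List Int) (citations : List Int), Dom_calculate_stratified_h h_ author_pos author_cnts citations → Pre_calculate_stratified_h h_ author_pos author_cnts citations → Spec_calculate_stratified_h h_ author_pos author_cnts citations (calculate_stratified_h h_ author_pos author_cnts citations)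

-- ===== LEMMAS AND PROOFS =====

-- proof-side abbreviations for A's intermediate data (used by the lemmas only)
def pvIdx (cs : List Int) : List Int :=
  PySem.List.sorted ((List.range cs.length).map (fun (k : Nat) => (k : Int))) (fun k => PySem.List.pyGetD cs k 0)

def pvR (cs : List Int) : List Int :=
  (List.range cs.length).foldl (fun r j => r.set ((pvIdx cs).getD j 0).toNat (j : Int))
    (List.replicate cs.length 0)

-- zipIdx as a map over range
lemma pv_zipIdx_eq (xs : List Int) :
    xs.zipIdx = (List.range xs.length).map (fun j => (xs.getD j 0, j)) := by
  apply List.ext_getElem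
  · simp
  · intro i h1 h2
    simp only [List.getElem_zipIdx, List.getElem_map, List.getElem_range]
    rw [List.getD_eq_getElem]
    · simp
    · simpa using h1

-- a Prop-conditional counting fold is countP
lemma pv_foldl_ite_count {α : Type} (l : List α) (c : α → Prop) [DecidablePred c] :
    l.foldl (fun (hn : Int) j => if c j then hn + 1 else hn) 0 =
      ((l.countP fun j => decide (c j) : Nat) : Int) := by
  have h := PySem.List.foldl_count_if (fun j => decide (c j)) l 0
  simpa using h

-- a Prop-conditional append fold is filter+map
lemma pv_fold_filter {α : Type} (l : List α) (c : α → Prop) [DecidablePred c] (f : α → Int) :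
    l.foldl (fun acc j => if c j then acc ++ [f j] else acc) [] =
      (l.filter (fun j => decide (c j))).map f := by
  have h := PySem.List.foldl_append_if (fun j => decide (c j)) f l []
  simpa using h

-- reversal reindexing for countP over range
lemma pv_countP_range_rev (n : Nat) (p : Nat → Bool) :
    (List.range n).countP p = (List.range n).countP (fun i => p (n - 1 - i)) := by
  conv_lhs => rw [← List.countP_reverse, List.range_eq_range', List.reverse_range',
    List.countP_map]
  simp [Function.comp_def]

-- the rank fold: after writing r[v[j]] := j for j = 0..t-1 over a duplicate-free index list v,
-- position v[p] holds p
lemma pv_rank_fold (v : List Int) (m : Nat)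
    (hv : ∀ p, p < v.length → 0 ≤ v.getD p 0 ∧ v.getD p 0 < (m : Int))
    (hnd : v.Nodup) (r0 : List Int) (h0 : r0.length = m) (t : Nat) (ht : t ≤ v.length) :
    ((List.range t).foldl (fun r j => r.set (v.getD j 0).toNat (j : Int)) r0).length = m ∧
    ∀ p, p < t →
      ((List.range t).foldl (fun r j => r.set (v.getD j 0).toNat (j : Int)) r0).getD (v.getD p 0).toNat 0 = (p : Int) := by
  induction t with
  | zero => exact ⟨h0, by omega⟩
  | succ t ih =>
    obtain ⟨ihlen, ihval⟩ := ih (by omega)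
    rw [List.range_succ, List.foldl_append]
    simp only [List.foldl_cons, List.foldl_nil]
    have hlt : t < v.length := by omega
    have hvt := hv t hlt
    have hidx : (v.getD t 0).toNat < m := by omega
    refine ⟨by rw [List.length_set]; exact ihlen, ?_⟩
    intro p hp
    by_cases hpt : p = t
    · subst hpt
      rw [List.getD_eq_getElem _ _ (by rw [List.length_set, ihlen]; exact hidx)]
      exact List.getElem_set_self _
    · have hplt : p < v.length := by omega
      have hvp := hv p hplt
      have hne : (v.getD t 0).toNat ≠ (v.getD p 0).toNat := by
        rw [List.getD_eq_getElem _ _ hlt, List.getD_eq_getElem _ _ hplt]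
        intro hEq
        have hvv : v[t] = v[p] := by
          rw [List.getD_eq_getElem _ _ hlt] at hvt
          rw [List.getD_eq_getElem _ _ hplt] at hvp
          omega
        have := (List.Nodup.getElem_inj_iff hnd).mp hvv
        omega
      rw [List.getD_eq_getElem _ _ (by rw [List.length_set, ihlen]; omega),
        List.getElem_set_ne hne]
      rw [← List.getD_eq_getElem _ 0 (by rw [ihlen]; omega)]
      exact ihval p (by omega)

-- basic facts about the sorted index list
lemma pv_idx_perm (cs : List Int) :
    (pvIdx cs).Perm ((List.range cs.length).map (fun (k : Nat) => (k : Int))) :=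
  PySem.List.sorted_perm _ _ _

lemma pv_idx_length (cs : List Int) : (pvIdx cs).length = cs.length := by
  simpa using (pv_idx_perm cs).length_eq

lemma pv_idx_nodup (cs : List Int) : (pvIdx cs).Nodup :=
  (pv_idx_perm cs).nodup_iff.mpr
    (List.nodup_range.map (fun a b hab => by exact_mod_cast hab))

lemma pv_idx_getD (cs : List Int) (p : Nat) (hp : p < (pvIdx cs).length) :
    0 ≤ (pvIdx cs).getD p 0 ∧ (pvIdx cs).getD p 0 < (cs.length : Int) := by
  rw [List.getD_eq_getElem _ _ hp]
  have hmem : (pvIdx cs)[p] ∈ pvIdx cs := List.getElem_mem hp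
  have h := (pv_idx_perm cs).mem_iff.mp hmem
  simp only [List.mem_map, List.mem_range] at h
  obtain ⟨k, hk, hke⟩ := h
  rw [← hke]
  omega

-- cs itself as the key-image of the cast range
lemma pv_map_key_range (cs : List Int) :
    (List.range cs.length).map (fun (k : Nat) => PySem.List.pyGetD cs (k : Int) 0) = cs := by
  have h := PySem.List.map_pyGetD_pyRange_zero cs 0
  rw [show PySem.List.len cs = ((cs.length : Nat) : Int) from by simp [PySem.List.len],
    PySem.List.pyRange_zero_natCast, List.map_map] at h
  simpa only [Function.comp_def] using h

lemma pv_asc_perm (cs : List Int) :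
    ((pvIdx cs).map (fun k => PySem.List.pyGetD cs k 0)).Perm cs := by
  have h1 := (pv_idx_perm cs).map (fun k => PySem.List.pyGetD cs k 0)
  rw [List.map_map] at h1
  have h2 : (List.range cs.length).map ((fun k => PySem.List.pyGetD cs k 0) ∘ (fun (k : Nat) => (k : Int))) = cs := by
    simpa only [Function.comp_def] using pv_map_key_range cs
  rwa [h2] at h1

lemma pv_asc_pairwise (cs : List Int) :
    ((pvIdx cs).map (fun k => PySem.List.pyGetD cs k 0)).Pairwise (· ≤ ·) := by
  refine List.pairwise_map.mpr ?_
  exact PySem.List.sorted_pairwise _ _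

-- the descending value sort is the reverse of the ascending one
lemma pv_desc_eq (cs : List Int) :
    PySem.List.sorted cs (fun x => x) true =
      ((pvIdx cs).map (fun k => PySem.List.pyGetD cs k 0)).reverse := by
  apply List.Perm.eq_of_pairwise (le := fun a b : Int => b ≤ a)
  · intro a b _ _ h1 h2; exact le_antisymm h2 h1
  · exact PySem.List.sorted_pairwise_rev cs _
  · rw [List.pairwise_reverse]
    exact pv_asc_pairwise cs
  · exact (PySem.List.sorted_perm cs _ true).trans
      ((pv_asc_perm cs).symm.trans (List.reverse_perm _).symm)

-- the rank table holds p at position idx[p]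
lemma pv_r_spec (cs : List Int) :
    (pvR cs).length = cs.length ∧
    ∀ p, p < cs.length → (pvR cs).getD ((pvIdx cs).getD p 0).toNat 0 = (p : Int) := by
  have h := pv_rank_fold (pvIdx cs) cs.length
    (fun p hp => pv_idx_getD cs p hp) (pv_idx_nodup cs)
    (List.replicate cs.length 0) (by simp) cs.length (le_of_eq (pv_idx_length cs).symm)
  exact h

lemma pv_r_at_idx (cs : List Int) (p : Nat) (hp : p < cs.length) :
    PySem.List.pyGetD (pvR cs) ((pvIdx cs).getD p 0) 0 = (p : Int) := by
  obtain ⟨hb1, hb2⟩ := pv_idx_getD cs p (by rw [pv_idx_length]; exact hp)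
  rw [show (pvIdx cs).getD p 0 = (((pvIdx cs).getD p 0).toNat : Int) from
    (Int.toNat_of_nonneg hb1).symm, PySem.List.pyGetD_natCast]
  exact (pv_r_spec cs).2 p hp

-- A's helper as a countP over the original order
lemma pv_calcA (cs : List Int) :
    pvCalcH cs = (((List.range cs.length).countP
      (fun j => decide ((cs.length : Int) - (pvR cs).getD j 0 ≤ cs.getD j 0))) : Int) := by
  unfold pvCalcH pvSortAndRank pvRank
  simp only [show PySem.List.len cs = ((cs.length : Nat) : Int) from by simp [PySem.List.len],
    PySem.List.pyRange_zero_natCast, Int.toNat_natCast, List.foldl_map,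
    PySem.List.pyGetD_natCast, PySem.List.foldl_append_singleton_eq_map, List.nil_append]
  rw [pv_foldl_ite_count]
  unfold pvR pvIdx
  refine congrArg _ (List.countP_congr ?_)
  intro j hj
  have hjn : j < cs.length := List.mem_range.mp hj
  rw [PySem.List.getD_map_range _ _ _ _ hjn]

-- B's helper as a countP over the descending sort
lemma pv_calcB (cs : List Int) :
    pvCalcHAlt cs = (((List.range cs.length).countP
      (fun (i : Nat) => decide ((i : Int) + 1 ≤ (PySem.List.sorted cs (fun x => x) true).getD i 0))) : Int) := by
  unfold pvCalcHAlt
  simp only [show PySem.List.len (PySem.List.sorted cs (fun x => x) true) = ((cs.length : Nat) : Int) from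
      by simp [PySem.List.len, PySem.List.length_sorted],
    PySem.List.pyRange_zero_natCast, List.foldl_map, PySem.List.pyGetD_natCast]
  rw [pv_foldl_ite_count]

-- transport A's count along the sorting permutation
lemma pv_countA_perm (cs : List Int) :
    (List.range cs.length).countP
      (fun j => decide ((cs.length : Int) - (pvR cs).getD j 0 ≤ cs.getD j 0)) =
    (List.range cs.length).countP
      (fun p => decide ((cs.length : Int) - p ≤
        ((pvIdx cs).map (fun k => PySem.List.pyGetD cs k 0)).getD p 0)) := by
  have h1 : (List.range cs.length).countP
      (fun j => decide ((cs.length : Int) - (pvR cs).getD j 0 ≤ cs.getD j 0)) =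
      (((List.range cs.length).map (fun (k : Nat) => (k : Int))).map
        (fun x => (PySem.List.pyGetD (pvR cs) x 0, PySem.List.pyGetD cs x 0))).countP
        (fun y => decide ((cs.length : Int) - y.1 ≤ y.2)) := by
    rw [List.countP_map, List.countP_map]
    refine List.countP_congr ?_
    intro j hj
    simp [Function.comp_def, PySem.List.pyGetD_natCast]
  have h2 : (((List.range cs.length).map (fun (k : Nat) => (k : Int))).map
        (fun x => (PySem.List.pyGetD (pvR cs) x 0, PySem.List.pyGetD cs x 0))).countP
        (fun y => decide ((cs.length : Int) - y.1 ≤ y.2)) =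
      ((pvIdx cs).map
        (fun x => (PySem.List.pyGetD (pvR cs) x 0, PySem.List.pyGetD cs x 0))).countP
        (fun y => decide ((cs.length : Int) - y.1 ≤ y.2)) :=
    (List.Perm.countP_eq _ ((pv_idx_perm cs).map _)).symm
  have h3 : (pvIdx cs).map
        (fun x => (PySem.List.pyGetD (pvR cs) x 0, PySem.List.pyGetD cs x 0)) =
      (List.range cs.length).map (fun (p : Nat) => ((p : Int),
        ((pvIdx cs).map (fun k => PySem.List.pyGetD cs k 0)).getD p 0)) := by
    apply List.ext_getElem
    · simp [pv_idx_length]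
    · intro i hA hB
      have hi : i < cs.length := by
        rw [List.length_map, pv_idx_length] at hA; exact hA
      simp only [List.getElem_map, List.getElem_range]
      have hgd : (pvIdx cs)[i]'(by rw [pv_idx_length]; exact hi) = (pvIdx cs).getD i 0 :=
        (List.getD_eq_getElem _ _ _).symm
      rw [hgd]
      refine Prod.ext ?_ ?_
      · exact pv_r_at_idx cs i hi
      · show PySem.List.pyGetD cs ((pvIdx cs).getD i 0) 0 = _
        rw [List.getD_eq_getElem ((pvIdx cs).map (fun k => PySem.List.pyGetD cs k 0)) 0
            (by rw [List.length_map, pv_idx_length]; exact hi),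
          List.getElem_map, ← hgd]
  rw [h1, h2, h3, List.countP_map]
  refine List.countP_congr ?_
  intro j hj
  simp

-- reverse-reindex B's count into A's
lemma pv_count_final (cs : List Int) :
    (List.range cs.length).countP
      (fun (i : Nat) => decide ((i : Int) + 1 ≤
        (((pvIdx cs).map (fun k => PySem.List.pyGetD cs k 0)).reverse).getD i 0)) =
    (List.range cs.length).countP
      (fun p => decide ((cs.length : Int) - p ≤
        ((pvIdx cs).map (fun k => PySem.List.pyGetD cs k 0)).getD p 0)) := by
  have hlen : ((pvIdx cs).map (fun k => PySem.List.pyGetD cs k 0)).length = cs.length := by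
    rw [List.length_map, pv_idx_length]
  rw [pv_countP_range_rev cs.length
    (fun i => decide ((i : Int) + 1 ≤
      (((pvIdx cs).map (fun k => PySem.List.pyGetD cs k 0)).reverse).getD i 0))]
  refine List.countP_congr ?_
  intro i hi
  have hin : i < cs.length := List.mem_range.mp hi
  have hrevlen : (((pvIdx cs).map (fun k => PySem.List.pyGetD cs k 0)).reverse).length = cs.length := by
    rw [List.length_reverse, hlen]
  have h1 : (((pvIdx cs).map (fun k => PySem.List.pyGetD cs k 0)).reverse).getD (cs.length - 1 - i) 0 =
      ((pvIdx cs).map (fun k => PySem.List.pyGetD cs k 0)).getD i 0 := by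
    rw [List.getD_eq_getElem _ 0 (by rw [hrevlen]; omega), List.getElem_reverse,
      List.getD_eq_getElem _ 0 (by rw [hlen]; omega)]
    congr 1
    rw [hlen]
    omega
  rw [h1]
  simp only [decide_eq_true_eq]
  omega

-- THE core lemma: both h-index helpers agree
lemma pv_calcH_eq (cs : List Int) : pvCalcH cs = pvCalcHAlt cs := by
  rw [pv_calcA, pv_calcB, pv_desc_eq]
  exact congrArg _ ((pv_countA_perm cs).trans (pv_count_final cs).symm)

-- A's quadruple fold splits into four independent append folds
lemma pv_partition_split (ap ac cit : List Int) (l : List Nat)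
    (a b c d : List Int) :
    l.foldl (fun (s : List Int × List Int × List Int × List Int) (i : Nat) =>
      let p := PySem.List.pyGetD ap (i : Int) 0
      let t : List Int × List Int × List Int :=
        if p = 1 then (s.1 ++ [PySem.List.pyGetD cit (i : Int) 0], s.2.1, s.2.2.1)
        else if p = 2 then (s.1, s.2.1 ++ [PySem.List.pyGetD cit (i : Int) 0], s.2.2.1)
        else if p = 3 then (s.1, s.2.1, s.2.2.1 ++ [PySem.List.pyGetD cit (i : Int) 0])
        else (s.1, s.2.1, s.2.2.1)
      let publast := if p = PySem.List.pyGetD ac (i : Int) 0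
        then s.2.2.2 ++ [PySem.List.pyGetD cit (i : Int) 0] else s.2.2.2
      (t.1, t.2.1, t.2.2, publast)) (a, b, c, d) =
    (l.foldl (fun acc (i : Nat) => if PySem.List.pyGetD ap (i : Int) 0 = 1
        then acc ++ [PySem.List.pyGetD cit (i : Int) 0] else acc) a,
     l.foldl (fun acc (i : Nat) => if PySem.List.pyGetD ap (i : Int) 0 = 2
        then acc ++ [PySem.List.pyGetD cit (i : Int) 0] else acc) b,
     l.foldl (fun acc (i : Nat) => if PySem.List.pyGetD ap (i : Int) 0 = 3
        then acc ++ [PySem.List.pyGetD cit (i : Int) 0] else acc) c,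
     l.foldl (fun acc (i : Nat) => if PySem.List.pyGetD ap (i : Int) 0 = PySem.List.pyGetD ac (i : Int) 0
        then acc ++ [PySem.List.pyGetD cit (i : Int) 0] else acc) d) := by
  induction l generalizing a b c d with
  | nil => rfl
  | cons x xs ih =>
    simp only [List.foldl_cons]
    rw [ih]
    refine Prod.ext ?_ (Prod.ext ?_ (Prod.ext ?_ ?_)) <;> dsimp only <;> congr 1 <;>
      split_ifs <;> first | rfl | omega

-- the partition tuples agree
lemma pv_parts_eq (ap ac cit : List Int) :
    ((PySem.List.pyRange 0 (PySem.List.len ap)).foldl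
      (fun (s : List Int × List Int × List Int × List Int) i =>
        let p := PySem.List.pyGetD ap i 0
        let t : List Int × List Int × List Int :=
          if p = 1 then (s.1 ++ [PySem.List.pyGetD cit i 0], s.2.1, s.2.2.1)
          else if p = 2 then (s.1, s.2.1 ++ [PySem.List.pyGetD cit i 0], s.2.2.1)
          else if p = 3 then (s.1, s.2.1, s.2.2.1 ++ [PySem.List.pyGetD cit i 0])
          else (s.1, s.2.1, s.2.2.1)
        let publast := if p = PySem.List.pyGetD ac i 0
          then s.2.2.2 ++ [PySem.List.pyGetD cit i 0] else s.2.2.2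
        (t.1, t.2.1, t.2.2, publast))
      ([], [], [], [])) =
    ((ap.zipIdx.filter (fun q => q.1 == 1)).map (fun q => PySem.List.pyGetD cit (q.2 : Int) 0),
     (ap.zipIdx.filter (fun q => q.1 == 2)).map (fun q => PySem.List.pyGetD cit (q.2 : Int) 0),
     (ap.zipIdx.filter (fun q => q.1 == 3)).map (fun q => PySem.List.pyGetD cit (q.2 : Int) 0),
     (ap.zipIdx.filter (fun q => q.1 == PySem.List.pyGetD ac (q.2 : Int) 0)).map
       (fun q => PySem.List.pyGetD cit (q.2 : Int) 0)) := by
  rw [show PySem.List.len ap = ((ap.length : Nat) : Int) from by simp [PySem.List.len],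
    PySem.List.pyRange_zero_natCast, List.foldl_map, pv_partition_split,
    pv_fold_filter, pv_fold_filter, pv_fold_filter, pv_fold_filter,
    pv_zipIdx_eq]
  simp only [List.filter_map, List.map_map, Function.comp_def, PySem.List.pyGetD_natCast]
  refine Prod.ext ?_ (Prod.ext ?_ (Prod.ext ?_ ?_)) <;> dsimp only <;> congr 1

-- ===== VERDICT (by name: the statement is the Claim_ definition above) =====
theorem calculate_stratified_h_spec : Claim_equal_calculate_stratified_h := by
  intro h_ ap ac cit _ _
  unfold Spec_calculate_stratified_h calculate_stratified_h calculate_stratified_h_alt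
  rw [pv_parts_eq ap ac cit]
  simp only [pv_calcH_eq]
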